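-- pv_equiv track=rewrite | github.com/stollerdaws/CTF-CyberSec | braeker/block_construction/solve.py | find_duplicate_blocks
-- ===== SOURCE A (Python) =====
-- def find_duplicate_blocks(ciphertext):
--     seen_blocks = set()
--     duplicates = set()
--     for block in ciphertext:
--         if block in seen_blocks:
--             duplicates.add(block)
--         else:
--             seen_blocks.add(block)
--     return duplicates
-- ===== SOURCE B (Python) =====
-- def find_duplicate_blocks(ciphertext):
--     first = {}
--     for i, block in enumerate(ciphertext):
--         first.setdefault(block, i)
--     return {block for i, block in enumerate(ciphertext) if first[block] < i}
-- ===== Notes on version B (the rewrite author's own statement) =====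
-- stated objective: alternative
-- what changed: Replaces A's online seen/duplicates two-set loop with branching by two passes: a dict mapping each block to its first index, then a set comprehension keeping blocks that occur after their first index.
import Mathlib
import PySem

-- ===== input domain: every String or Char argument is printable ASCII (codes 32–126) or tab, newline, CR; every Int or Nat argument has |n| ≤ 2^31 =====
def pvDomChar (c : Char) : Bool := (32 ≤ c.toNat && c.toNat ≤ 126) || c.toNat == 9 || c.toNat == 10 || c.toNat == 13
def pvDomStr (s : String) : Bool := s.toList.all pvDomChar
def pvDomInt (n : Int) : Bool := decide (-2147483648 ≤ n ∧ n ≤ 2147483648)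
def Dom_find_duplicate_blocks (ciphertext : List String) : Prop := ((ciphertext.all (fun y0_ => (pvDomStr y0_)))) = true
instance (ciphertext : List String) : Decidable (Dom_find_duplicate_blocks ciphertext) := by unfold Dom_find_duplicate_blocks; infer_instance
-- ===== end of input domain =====

-- B replaces A's online seen/duplicates two-set loop with two passes: a dict of first-occurrence
-- indices, then a set comprehension keeping blocks occurring after their first index (alternative decomposition).

-- ===== PORT A =====
-- seen_blocks = set(); duplicates = set(); for block: if block in seen: duplicates.add else seen.add; return duplicates
def find_duplicate_blocks (ciphertext : List String) : List String :=
  (ciphertext.foldl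
    (fun (st : PySem.Set String × PySem.Set String) block =>
      if PySem.Set.contains st.1 block then (st.1, PySem.Set.add st.2 block)
      else (PySem.Set.add st.1 block, st.2))
    (PySem.Set.empty, PySem.Set.empty)).2

-- ===== PORT B =====
-- first = {}; for i, block in enumerate(ciphertext): first.setdefault(block, i)
-- return {block for i, block in enumerate(ciphertext) if first[block] < i}
-- (first[block] never raises: every block was inserted by the first pass, so get? is always some; getD 0 is exact here)
def find_duplicate_blocks_alt (ciphertext : List String) : List String :=
  let first : PySem.Dict String Int :=
    (PySem.List.enumerate ciphertext).foldl (fun d p => d.setdefault p.2 p.1) PySem.Dict.empty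
  PySem.Set.ofList
    (((PySem.List.enumerate ciphertext).filter
        (fun p => decide ((first.get? p.2).getD 0 < p.1))).map Prod.snd)

-- ===== PRECONDITION & SPEC =====
def Spec_find_duplicate_blocks (ciphertext : List String) (out : List String) : Prop := out = find_duplicate_blocks_alt ciphertext
instance (ciphertext : List String) (out : List String) : Decidable (Spec_find_duplicate_blocks ciphertext out) := by unfold Spec_find_duplicate_blocks; infer_instance

-- ===== CLAIM (what is proved, stated in full; the proofs are below) =====
def Claim_equal_find_duplicate_blocks : Prop := ∀ (ciphertext : List String), Dom_find_duplicate_blocks ciphertext → Spec_find_duplicate_blocks ciphertext (find_duplicate_blocks ciphertext)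

-- ===== LEMMAS AND PROOFS =====

-- the first-index dict built by B's first pass, looked up at key b
lemma firstDict_get? (xs : List String) (s : Int) (d : PySem.Dict String Int) (b : String) :
    ((PySem.List.enumerate xs s).foldl (fun d p => d.setdefault p.2 p.1) d).get? b
      = ((d.get? b).orElse (fun _ => (PySem.List.index? xs b).map (fun j => s + (j : Int)))) := by
  induction xs generalizing s d with
  | nil =>
    cases h : d.get? b <;> simp [h, PySem.List.enumerate, PySem.List.index?_eq_idxOf?, Option.orElse]
  | cons x xs ih =>
    rw [PySem.List.enumerate_cons, List.foldl_cons, ih]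
    dsimp only
    by_cases hb : b = x
    · subst hb
      rw [PySem.Dict.get?_setdefault_self, PySem.List.index?_cons_self]
      cases h : d.get? b <;> simp [Option.orElse]
    · rw [PySem.Dict.get?_setdefault_of_ne d _ hb, PySem.List.index?_cons_of_ne xs (Ne.symm hb)]
      congr 1
      funext u
      cases PySem.List.index? xs b with
      | none => rfl
      | some j => simp; ring

-- B's comprehension test "first[block] < i" coincides with "block occurs in the first i elements"
lemma bridge (ct : List String) (k : Nat) (hk : k < ct.length) :
    decide ((((PySem.List.enumerate ct).foldl (fun d p => d.setdefault p.2 p.1)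
        (PySem.Dict.empty : PySem.Dict String Int)).get? ct[k]).getD 0 < (k:Int))
      = (ct.take k).contains ct[k] := by
  rw [firstDict_get?]
  have hmem : ct[k] ∈ ct := List.getElem_mem hk
  obtain ⟨j, hj⟩ := Option.isSome_iff_exists.mp ((PySem.List.index?_isSome_iff ct ct[k]).mpr hmem)
  obtain ⟨hjlen, hbj, hmin⟩ := PySem.List.getElem_of_index?_eq_some hj
  rw [hj]
  have hget : (PySem.Dict.empty : PySem.Dict String Int).get? ct[k] = none := by
    simp [PySem.Dict.get?, PySem.Dict.empty]
  rw [hget]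
  have hiff : j < k ↔ ct[k] ∈ ct.take k := by
    constructor
    · intro h
      exact List.mem_take_iff_getElem.mpr ⟨j, by omega, hbj⟩
    · intro h
      obtain ⟨i, hi, hib⟩ := List.mem_take_iff_getElem.mp h
      by_contra hnot
      exact hmin i (by omega) hib
  by_cases h : j < k
  · simp [Option.orElse, hiff.mp h, h]
  · have : ct[k] ∉ ct.take k := fun hm => h (hiff.mpr hm)
    simp [Option.orElse, this]
    omega

-- the list of non-first occurrences, phrased on prefixes (both sides reduce to it)
def dupsOf (ct : List String) : List String :=
  ((PySem.List.enumerate ct).filter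
     (fun p => (ct.take p.1.toNat).contains p.2)).map Prod.snd

lemma alt_eq_dupsOf (ct : List String) :
    find_duplicate_blocks_alt ct = PySem.Set.ofList (dupsOf ct) := by
  unfold find_duplicate_blocks_alt dupsOf
  dsimp only
  congr 2
  apply List.filter_congr
  intro p hp
  rcases (PySem.List.mem_enumerate_iff ct 0 p).1 hp with ⟨k, hk, rfl⟩
  simpa using bridge ct k hk

lemma dupsOf_append (xs : List String) (x : String) :
    dupsOf (xs ++ [x]) = dupsOf xs ++ (if xs.contains x then [x] else []) := by
  unfold dupsOf
  rw [PySem.List.enumerate_append, List.filter_append, List.map_append]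
  congr 1
  · congr 1
    apply List.filter_congr
    intro p hp
    rcases (PySem.List.mem_enumerate_iff xs 0 p).1 hp with ⟨k, hk, rfl⟩
    simp only [zero_add, Int.toNat_natCast]
    rw [List.take_append_of_le_length (le_of_lt hk)]
  · simp only [PySem.List.enumerate, zero_add]
    have h : (xs ++ [x]).take ((xs.length : Int)).toNat = xs := by
      rw [Int.toNat_natCast, List.take_append_of_le_length le_rfl, List.take_length]
    simp only [List.filter, h]
    split <;> simp_all

lemma ofList_append_singleton (l : List String) (x : String) :
    PySem.Set.ofList (l ++ [x]) = PySem.Set.add (PySem.Set.ofList l) x := by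
  simp [PySem.Set.ofList_eq_foldl, List.foldl_append]

-- invariant of A's loop: after a prefix xs, seen = set(xs) and duplicates = set(dupsOf xs)
lemma fold_pair (xs : List String) :
    xs.foldl
      (fun (st : PySem.Set String × PySem.Set String) block =>
        if PySem.Set.contains st.1 block then (st.1, PySem.Set.add st.2 block)
        else (PySem.Set.add st.1 block, st.2))
      (PySem.Set.empty, PySem.Set.empty)
      = (PySem.Set.ofList xs, PySem.Set.ofList (dupsOf xs)) := by
  induction xs using List.reverseRecOn with
  | nil => rfl
  | append_singleton xs x ih =>
    rw [List.foldl_append, ih, dupsOf_append]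
    by_cases hm : x ∈ xs
    · simp [ofList_append_singleton, hm, PySem.Set.add, PySem.Set.contains, PySem.Set.mem_ofList]
    · simp [ofList_append_singleton, hm, PySem.Set.add, PySem.Set.contains, PySem.Set.mem_ofList]

-- ===== VERDICT (by name: the statement is the Claim_ definition above) =====
theorem find_duplicate_blocks_spec : Claim_equal_find_duplicate_blocks := by
  intro ciphertext _
  unfold Spec_find_duplicate_blocks find_duplicate_blocks
  rw [fold_pair, alt_eq_dupsOf]
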